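-- pv_equiv track=rewrite | github.com/b0mbillo/TLP-2022-2 | Python/VPL1.py | existe
-- ===== SOURCE A (Python) =====
-- def subconjunto(pesos):
--     Lt=[]
--     if not pesos:
--         Lt.append(pesos)
--     else:
--         for i in subconjunto(pesos[1:]):
--             Lt.append(i)
--             Lt.append([pesos[0]] + i)
--     return Lt
--
-- def existe(peso,pesos):
--     #aqui va su codigo, tambien debe rellenar los parametros de la funcion y el retorno
--     #en esta funcion debe devolver los subconjuntos que cumplan con el enunciado
--     conjuntos = subconjunto(pesos)
--     Lista = []
--     for i in conjuntos:
--         i.sort()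
--         Lista.append(i)
--         if sum(i) == peso and i:
--             Lista.append(i)
--     Lista.sort(key=lambda x: (len(x), (x)))
--     return Lista
-- ===== SOURCE B (Python) =====
-- def existe(peso, pesos):
--     # iterative bitmask enumeration of all subsets instead of A's recursive subconjunto
--     out = []
--     for mask in range(2 ** len(pesos)):
--         sub = []
--         m = mask
--         for x in pesos:
--             if m & 1:
--                 sub.append(x)
--             m >>= 1
--         sub.sort()
--         out.append(sub)
--         if sub and sum(sub) == peso:
--             out.append(sub)
--     return sorted(out, key=lambda x: (len(x), x))
-- ===== Notes on version B (the rewrite author's own statement) =====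
-- stated objective: alternative
-- what changed: Replaces the recursive subconjunto power-set construction with a single iterative bitmask loop (mask 0..2^n-1, extracting each subset by bit tests), keeping the per-subset sort, duplication rule and final (len, list) sort.
import Mathlib
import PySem

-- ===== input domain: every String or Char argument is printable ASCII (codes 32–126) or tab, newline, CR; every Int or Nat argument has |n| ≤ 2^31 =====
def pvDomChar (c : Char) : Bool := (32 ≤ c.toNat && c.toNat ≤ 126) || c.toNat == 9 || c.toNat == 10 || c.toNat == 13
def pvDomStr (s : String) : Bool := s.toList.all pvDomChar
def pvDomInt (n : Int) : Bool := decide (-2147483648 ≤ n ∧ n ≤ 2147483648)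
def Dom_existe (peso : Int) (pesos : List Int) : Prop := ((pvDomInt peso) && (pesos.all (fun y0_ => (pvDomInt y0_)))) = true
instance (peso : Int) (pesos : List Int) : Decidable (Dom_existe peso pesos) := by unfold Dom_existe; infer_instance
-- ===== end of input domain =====

-- B replaces the recursive power-set construction with an iterative bitmask enumeration (alternative decomposition, same cost).

-- ===== PORT A =====
def subconjunto_A (pesos : List Int) : List (List Int) :=
  match pesos with
  | [] => [([] : List Int)]
  | h :: t => (subconjunto_A t).foldl (fun Lt i => Lt ++ [i, h :: i]) []

def existe (peso : Int) (pesos : List Int) : List (List Int) :=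
  let conjuntos := subconjunto_A pesos
  let Lista := conjuntos.foldl (fun Lista i =>
    let i := PySem.List.sorted i (fun x => x)
    let Lista := Lista ++ [i]
    if i.sum = peso ∧ i ≠ [] then Lista ++ [i] else Lista) []
  PySem.List.sorted2 Lista (fun x => x.length) (fun x => x)

-- ===== PORT B =====
def existe_alt (peso : Int) (pesos : List Int) : List (List Int) :=
  let out := (List.range (2 ^ pesos.length)).foldl (fun out mask =>
    let sub := (pesos.foldl (fun s x => (if s.2 % 2 == 1 then s.1 ++ [x] else s.1, s.2 / 2))
                  (([] : List Int), mask)).1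
    let sub := PySem.List.sorted sub (fun x => x)
    let out := out ++ [sub]
    if sub ≠ [] ∧ sub.sum = peso then out ++ [sub] else out) []
  PySem.List.sorted2 out (fun x => x.length) (fun x => x)

-- ===== PRECONDITION & SPEC =====
def Spec_existe (peso : Int) (pesos : List Int) (out : List (List Int)) : Prop := out = existe_alt peso pesos
instance (peso : Int) (pesos : List Int) (out : List (List Int)) : Decidable (Spec_existe peso pesos out) := by unfold Spec_existe; infer_instance

-- ===== CLAIM (what is proved, stated in full; the proofs are below) =====
def Claim_equal_existe : Prop := ∀ (peso : Int) (pesos : List Int), Dom_existe peso pesos → Spec_existe peso pesos (existe peso pesos)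

-- ===== LEMMAS AND PROOFS =====

/-- The subset of `pesos` selected by the bits of `m`, in index order. -/
def rawSub : List Int → Nat → List Int
  | [], _ => []
  | h :: t, m => (if m % 2 == 1 then [h] else []) ++ rawSub t (m / 2)

theorem pvRangeTwoMul (k : Nat) :
    List.range (2 * k) = (List.range k).flatMap (fun m => [2 * m, 2 * m + 1]) := by
  induction k with
  | zero => simp
  | succ k ih =>
    have h : 2 * (k + 1) = (2 * k + 1) + 1 := by omega
    rw [h, List.range_succ, List.range_succ, List.range_succ, ih]
    simp

theorem subA_eq (pesos : List Int) :
    subconjunto_A pesos = (List.range (2 ^ pesos.length)).map (rawSub pesos) := by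
  induction pesos with
  | nil => simp [subconjunto_A, rawSub]
  | cons h t ih =>
    show (subconjunto_A t).foldl (fun Lt i => Lt ++ [i, h :: i]) [] = _
    rw [PySem.List.foldl_append_eq_flatMap (g := fun i => [i, h :: i]), ih]
    have hp : (2 : Nat) ^ (h :: t).length = 2 * 2 ^ t.length := by
      simp [pow_succ]; ring
    rw [hp, pvRangeTwoMul, List.flatMap_map, List.map_flatMap]
    simp only [List.nil_append]
    congr 1
    funext m
    have e1 : (2 * m) % 2 = 0 := by omega
    have e2 : 2 * m / 2 = m := by omega
    have e3 : (2 * m + 1) % 2 = 1 := by omega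
    have e4 : (2 * m + 1) / 2 = m := by omega
    simp [rawSub, e1, e2, e3, e4]

theorem bits_eq (pesos : List Int) (acc : List Int) (m : Nat) :
    (pesos.foldl (fun s x => (if s.2 % 2 == 1 then s.1 ++ [x] else s.1, s.2 / 2)) (acc, m)).1
      = acc ++ rawSub pesos m := by
  induction pesos generalizing acc m with
  | nil => simp [rawSub]
  | cons h t ih =>
    simp only [List.foldl_cons, rawSub]
    split <;> simp_all


-- ===== VERDICT (by name: the statement is the Claim_ definition above) =====
theorem existe_spec : Claim_equal_existe := by
  intro peso pesos _
  unfold Spec_existe existe existe_alt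
  dsimp only
  rw [subA_eq, List.foldl_map]
  congr 1
  apply PySem.List.foldl_congr_mem
  intro acc mask _
  simp only [bits_eq, List.nil_append]
  by_cases h1 : (PySem.List.sorted (rawSub pesos mask) (fun x => x)).sum = peso <;>
    by_cases h2 : PySem.List.sorted (rawSub pesos mask) (fun x => x) = [] <;>
    simp [h1, h2]
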